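-- pv_equiv track=rewrite | github.com/Victee-H/NTU-BDS-test | Question 1/question1.1.py | get_sum
-- ===== SOURCE A (Python) =====
-- def get_sum(path):
--     depth = 1
--     sum_num = 1
--     for i in range(len(path)):
--         if path[i] == 'R':
--             sum_num += depth
--         else:
--             depth += 1
--             sum_num += depth
--     return sum_num
-- ===== SOURCE B (Python) =====
-- def get_sum(path):
--     m = sum(1 for ch in path if ch != 'R')
--     total = 1 + len(path) + m * (m + 1) // 2
--     c = 0
--     for ch in path:
--         if ch == 'R':
--             total += c
--         else:
--             c += 1
--     return total
-- ===== Notes on version B (the rewrite author's own statement) =====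
-- stated objective: alternative
-- what changed: Replaces the running-depth accumulator with a count-and-closed-form decomposition: the non-'R' contributions become the triangular closed form 1 + len(path) + m*(m+1)//2, and a single pass maintaining only a non-'R' counter adds the cross-term at each 'R'.
import Mathlib
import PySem

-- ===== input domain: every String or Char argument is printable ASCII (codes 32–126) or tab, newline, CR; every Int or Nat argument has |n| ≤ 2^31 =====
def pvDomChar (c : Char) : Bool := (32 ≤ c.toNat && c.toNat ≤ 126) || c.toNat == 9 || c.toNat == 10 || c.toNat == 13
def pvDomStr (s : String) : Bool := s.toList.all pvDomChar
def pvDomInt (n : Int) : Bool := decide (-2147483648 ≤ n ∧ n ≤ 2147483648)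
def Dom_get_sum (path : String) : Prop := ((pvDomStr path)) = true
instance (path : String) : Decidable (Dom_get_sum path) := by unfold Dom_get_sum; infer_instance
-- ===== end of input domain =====

-- B replaces A's running-depth accumulator with a closed-form triangular count for the
-- non-'R' contributions plus a single cross-term pass (objective: alternative decomposition).


-- ===== PORT A =====
-- A's loop over path: state (depth, sum_num); branch on path[i] == 'R'
def pvFA : List Char → Int → Int → Int
  | [], _, s => s
  | ch :: l, d, s => if ch = 'R' then pvFA l d (s + d) else pvFA l (d + 1) (s + d + 1)

def get_sum (path : String) : Int := pvFA path.toList 1 1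

-- ===== PORT B =====
-- B's cross-term pass: state (c, total); 'R' adds c to total, otherwise c += 1
def pvFB : List Char → Int → Int → Int
  | [], _, t => t
  | ch :: l, c, t => if ch = 'R' then pvFB l c (t + c) else pvFB l (c + 1) t

def get_sum_alt (path : String) : Int :=
  let m : Int := ((path.toList.countP (fun ch => ch ≠ 'R') : Nat) : Int)
  let total : Int := 1 + ((path.toList.length : Nat) : Int) + PySem.Int.floordiv (m * (m + 1)) 2
  pvFB path.toList 0 total

-- ===== PRECONDITION & SPEC =====
def Spec_get_sum (path : String) (out : Int) : Prop := out = get_sum_alt path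
instance (path : String) (out : Int) : Decidable (Spec_get_sum path out) := by unfold Spec_get_sum; infer_instance

-- ===== CLAIM (what is proved, stated in full; the proofs are below) =====
def Claim_equal_get_sum : Prop := ∀ (path : String), Dom_get_sum path → Spec_get_sum path (get_sum path)

-- ===== LEMMAS AND PROOFS =====

theorem pvFB_add (l : List Char) (c t u : Int) :
    pvFB l c (t + u) = pvFB l c t + u := by
  induction l generalizing c t with
  | nil => simp [pvFB]
  | cons ch l ih =>
    by_cases h : ch = 'R'
    · simp only [pvFB, h, if_pos]
      rw [show t + u + c = (t + c) + u by ring, ih]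
    · simp only [pvFB, h, ite_false]
      exact ih _ _

theorem pvFB_shift (l : List Char) (c t : Int) :
    pvFB l (c + 1) t = pvFB l c t + ((l.countP (fun ch => decide (ch = 'R')) : Nat) : Int) := by
  induction l generalizing c t with
  | nil => simp [pvFB]
  | cons ch l ih =>
    by_cases h : ch = 'R'
    · simp only [pvFB, h, List.countP_cons, decide_true, if_pos]
      rw [show t + (c + 1) = (t + c) + 1 by ring, pvFB_add, ih]
      push_cast; ring
    · simp only [pvFB, h, ite_false, List.countP_cons, decide_false]
      rw [ih]
      simp

theorem countP_split (l : List Char) :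
    l.countP (fun ch => !decide (ch = 'R')) + l.countP (fun ch => decide (ch = 'R')) = l.length := by
  induction l with
  | nil => simp
  | cons ch l ih => by_cases h : ch = 'R' <;> simp [h] <;> omega

theorem pvFA_key (l : List Char) (d s : Int) :
    2 * pvFA l d s =
      2 * (s + d * ((l.length : Nat) : Int) + pvFB l 0 0) +
        ((l.countP (fun ch => !decide (ch = 'R')) : Nat) : Int) *
          (((l.countP (fun ch => !decide (ch = 'R')) : Nat) : Int) + 1) := by
  induction l generalizing d s with
  | nil => simp [pvFA, pvFB]
  | cons ch l ih =>
    by_cases h : ch = 'R'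
    · simp only [pvFA, pvFB, h, ite_true, List.countP_cons, decide_true, Bool.not_true,
        if_neg (by simp : ¬ (false = true)), Nat.add_zero, List.length_cons]
      rw [ih]
      push_cast; ring
    · simp only [pvFA, pvFB, h, ite_false, List.countP_cons, decide_false, Bool.not_false,
        List.length_cons]
      rw [ih, show (0 : Int) + 1 = 0 + 1 from rfl, pvFB_shift]
      have hs : ((l.countP (fun ch => !decide (ch = 'R')) : Nat) : Int)
          + ((l.countP (fun ch => decide (ch = 'R')) : Nat) : Int) = ((l.length : Nat) : Int) := by
        exact_mod_cast countP_split l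
      push_cast
      linear_combination (-2 : Int) * hs

theorem get_sum_eq_alt (path : String) : get_sum path = get_sum_alt path := by
  unfold get_sum get_sum_alt
  simp only [ne_eq, decide_not]
  set l := path.toList with hl
  set m : Int := ((l.countP (fun ch => !decide (ch = 'R')) : Nat) : Int) with hm
  have hkey := pvFA_key l 1 1
  rw [← hm] at hkey
  have hfb : pvFB l 0 (1 + ((l.length : Nat) : Int) + PySem.Int.floordiv (m * (m + 1)) 2)
      = pvFB l 0 0 + (1 + ((l.length : Nat) : Int) + PySem.Int.floordiv (m * (m + 1)) 2) := by
    rw [show (1 + ((l.length : Nat) : Int) + PySem.Int.floordiv (m * (m + 1)) 2)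
        = 0 + (1 + ((l.length : Nat) : Int) + PySem.Int.floordiv (m * (m + 1)) 2) by ring,
      pvFB_add]
    ring
  obtain ⟨k, hk⟩ : Even (m * (m + 1)) := Int.even_mul_succ_self m
  have hfd : PySem.Int.floordiv (m * (m + 1)) 2 = k := by
    rw [PySem.Int.floordiv_eq_ediv_of_pos (by norm_num), hk]; omega
  rw [hfb, hfd]
  rw [hk] at hkey
  omega

-- ===== VERDICT (by name: the statement is the Claim_ definition above) =====
theorem get_sum_spec : Claim_equal_get_sum := by
  intro path _
  unfold Spec_get_sum
  exact get_sum_eq_alt path
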